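-- pv_equiv track=rewrite | github.com/sticky-ai/Algorithms | arcade/the_core/pairOfShoes.py | pairOfShoes
-- ===== SOURCE A (Python) =====
-- def pairOfShoes(shoes):
--     for i in shoes:
--         if i[0] == 0:
--             if shoes.count(i) != shoes.count([i[0]+1, i[1]]):
--                 return False
--         elif i[0] == 1:
--             if shoes.count(i) != shoes.count([i[0]-1, i[1]]):
--                 return False
--     return True
-- ===== SOURCE B (Python) =====
-- def pairOfShoes(shoes):
--     srt = sorted(map(tuple, shoes))
--
--     def first_at_least(rec, strict):
--         # index of the first element >= rec (> rec when strict), by binary search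
--         lo, hi = 0, len(srt)
--         while lo < hi:
--             mid = (lo + hi) // 2
--             if srt[mid] < rec or (strict and srt[mid] == rec):
--                 lo = mid + 1
--             else:
--                 hi = mid
--         return lo
--
--     def count_of(rec):
--         return first_at_least(rec, True) - first_at_least(rec, False)
--
--     for rec in dict.fromkeys(srt):
--         if rec[0] == 0:
--             if count_of(rec) != count_of((1, rec[1])):
--                 return False
--         elif rec[0] == 1:
--             if count_of(rec) != count_of((0, rec[1])):
--                 return False
--     return True
-- ===== Notes on version B (the rewrite author's own statement) =====
-- stated objective: alternative
-- what changed: B sorts the records once, iterates over the distinct ones only (dict.fromkeys), and obtains every multiplicity by binary search on the sorted list, replacing A's per-shoe loop with two linear .count scans per shoe.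
-- outside the precondition, e.g. on pairOfShoes([[0, 5], [0]]): A returns False, B raises IndexError; on pairOfShoes([[1, 7], [1]]): A returns False, B raises IndexError
import Mathlib
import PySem

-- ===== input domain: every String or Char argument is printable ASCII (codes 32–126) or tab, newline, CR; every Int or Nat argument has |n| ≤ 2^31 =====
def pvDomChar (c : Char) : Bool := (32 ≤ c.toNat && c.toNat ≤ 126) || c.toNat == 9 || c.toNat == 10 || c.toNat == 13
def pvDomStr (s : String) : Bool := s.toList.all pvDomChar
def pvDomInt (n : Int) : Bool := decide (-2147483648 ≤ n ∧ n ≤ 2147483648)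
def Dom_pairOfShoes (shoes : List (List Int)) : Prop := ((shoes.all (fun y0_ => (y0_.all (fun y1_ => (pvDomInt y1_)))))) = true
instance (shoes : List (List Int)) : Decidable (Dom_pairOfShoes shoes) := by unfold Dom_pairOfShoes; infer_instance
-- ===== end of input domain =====

-- B sorts the records once, loops over the distinct ones only, and reads every multiplicity off
-- the sorted list by binary search, instead of A's per-shoe loop with two linear .count scans
-- (objective: alternative, sort-then-search).

-- ===== PORT A =====
-- literal transliteration of A's loop; i[0]/i[1] are pyGet? (IndexError = none, excluded by Pre_,
-- so the .getD 0 default is never the value Python's raise would hide on admitted inputs)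
def pairOfShoesLoop (shoes : List (List Int)) : List (List Int) → Bool
  | [] => true
  | i :: rest =>
    if (PySem.List.pyGet? i 0).getD 0 = 0 then
      if PySem.List.count shoes i ≠
          PySem.List.count shoes [(PySem.List.pyGet? i 0).getD 0 + 1, (PySem.List.pyGet? i 1).getD 0] then false
      else pairOfShoesLoop shoes rest
    else if (PySem.List.pyGet? i 0).getD 0 = 1 then
      if PySem.List.count shoes i ≠
          PySem.List.count shoes [(PySem.List.pyGet? i 0).getD 0 - 1, (PySem.List.pyGet? i 1).getD 0] then false
      else pairOfShoesLoop shoes rest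
    else pairOfShoesLoop shoes rest

def pairOfShoes (shoes : List (List Int)) : Bool := pairOfShoesLoop shoes shoes

-- ===== PORT B =====
-- Python's '<' on tuples of ints: lexicographic, a strict prefix is smaller
def pvLexLt : List Int → List Int → Bool
  | _, [] => false
  | [], _ :: _ => true
  | a :: as, b :: bs => if a < b then true else if b < a then false else pvLexLt as bs

-- Python's sorted(...) via PySem.List.sorted; the order instance is pinned to Mathlib's
-- lexicographic LinearOrder on List Int, which is exactly Python's '<' on int tuples
def pvSorted (shoes : List (List Int)) : List (List Int) :=
  @PySem.List.sorted (List Int) (List Int) LinearOrder.toPartialOrder.toLT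
    LinearOrder.toDecidableLT shoes (fun x => x) false

-- the 'while lo < hi' binary search of B's first_at_least, with its exact condition
-- 'srt[mid] < rec or (strict and srt[mid] == rec)'; mid is always in range, so getD's
-- default is never read
def pvBsLoop (srt : List (List Int)) (rec : List Int) (strict : Bool) (lo hi : Nat) : Nat :=
  if lo < hi then
    let mid := (lo + hi) / 2
    if pvLexLt (srt.getD mid []) rec || (strict && (srt.getD mid [] == rec)) then
      pvBsLoop srt rec strict (mid + 1) hi
    else
      pvBsLoop srt rec strict lo mid
  else lo
termination_by hi - lo
decreasing_by all_goals omega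

def pvFirstAtLeast (srt : List (List Int)) (rec : List Int) (strict : Bool) : Nat :=
  pvBsLoop srt rec strict 0 srt.length

def pvCountOf (srt : List (List Int)) (rec : List Int) : Int :=
  (pvFirstAtLeast srt rec true : Int) - (pvFirstAtLeast srt rec false : Int)

-- B's single loop over the distinct records (dict.fromkeys order); rec[0]/rec[1] are pyGet?
-- (IndexError = none, excluded by Pre_, so the .getD 0 default is never reached)
def pairOfShoesAltLoop (srt : List (List Int)) : List (List Int) → Bool
  | [] => true
  | rec :: rest =>
    if (PySem.List.pyGet? rec 0).getD 0 = 0 then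
      if pvCountOf srt rec ≠ pvCountOf srt [1, (PySem.List.pyGet? rec 1).getD 0] then false
      else pairOfShoesAltLoop srt rest
    else if (PySem.List.pyGet? rec 0).getD 0 = 1 then
      if pvCountOf srt rec ≠ pvCountOf srt [0, (PySem.List.pyGet? rec 1).getD 0] then false
      else pairOfShoesAltLoop srt rest
    else pairOfShoesAltLoop srt rest

def pairOfShoes_alt (shoes : List (List Int)) : Bool :=
  let srt := pvSorted shoes
  pairOfShoesAltLoop srt (PySem.List.dedup srt)

-- ===== PRECONDITION & SPEC =====
-- Pre_ excludes the inputs holding a record on which i[0]/i[1] raises IndexError (an empty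
-- record, or a one-element record whose head is 0 or 1); B raises there too. When such a record
-- is preceded (in A's order or in B's sorted order) by a failing pair check the raising program
-- returns False early — Pre_ still excludes that input (see the cites).
def Pre_pairOfShoes (shoes : List (List Int)) : Prop :=
  ∀ e ∈ shoes, e ≠ [] ∧ (e.length = 1 → e.headI ≠ 0 ∧ e.headI ≠ 1)
instance (shoes : List (List Int)) : Decidable (Pre_pairOfShoes shoes) := by
  unfold Pre_pairOfShoes; infer_instance

def pvWitness_pairOfShoes : List (List Int) := [[0, 21], [1, 23], [1, 21], [0, 23]]

def Spec_pairOfShoes (shoes : List (List Int)) (out : Bool) : Prop := out = pairOfShoes_alt shoes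
instance (shoes : List (List Int)) (out : Bool) : Decidable (Spec_pairOfShoes shoes out) := by
  unfold Spec_pairOfShoes; infer_instance

-- ===== CLAIM (what is proved, stated in full; the proofs are below) =====
def Claim_equal_pairOfShoes : Prop := ∀ (shoes : List (List Int)), Dom_pairOfShoes shoes → Pre_pairOfShoes shoes → Spec_pairOfShoes shoes (pairOfShoes shoes)

-- ===== LEMMAS AND PROOFS =====

-- the per-record check both programs decide: a flagged record's multiplicity equals its partner's
def pvOk (shoes : List (List Int)) (e : List Int) : Bool :=
  match e with
  | a :: b :: _ =>
    if a = 0 then List.count e shoes == List.count [1, b] shoes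
    else if a = 1 then List.count e shoes == List.count [0, b] shoes
    else true
  | _ => true

-- A's loop checks pvOk at every record of the suffix, early return = List.all
lemma pvLoopA_eq (shoes l : List (List Int))
    (hl : ∀ e ∈ l, e ≠ [] ∧ (e.length = 1 → e.headI ≠ 0 ∧ e.headI ≠ 1)) :
    pairOfShoesLoop shoes l = l.all (pvOk shoes) := by
  induction l with
  | nil => rfl
  | cons e rest ih =>
    have he := hl e (List.mem_cons_self ..)
    have hrest := ih (fun x hx => hl x (List.mem_cons_of_mem _ hx))
    match e with
    | [] => exact absurd rfl he.1
    | [a] =>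
      obtain ⟨ha0, ha1⟩ := he.2 rfl
      simp only [List.headI] at ha0 ha1
      have hstep : pairOfShoesLoop shoes ([a] :: rest) = pairOfShoesLoop shoes rest := by
        simp [pairOfShoesLoop, ha0, ha1]
      rw [hstep, hrest]
      simp [pvOk]
    | a :: b :: t =>
      by_cases ha0 : a = 0
      · subst ha0
        by_cases hcnt : List.count (0 :: b :: t : List Int) shoes = List.count [1, b] shoes
        · have hstep : pairOfShoesLoop shoes ((0 :: b :: t) :: rest) = pairOfShoesLoop shoes rest := by
            simp [pairOfShoesLoop, hcnt]
          rw [hstep, hrest]; simp [pvOk, hcnt]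
        · have hstep : pairOfShoesLoop shoes ((0 :: b :: t) :: rest) = false := by
            simp [pairOfShoesLoop, hcnt]
          rw [hstep]; simp [pvOk, hcnt]
      · by_cases ha1 : a = 1
        · subst ha1
          by_cases hcnt : List.count (1 :: b :: t : List Int) shoes = List.count [0, b] shoes
          · have hstep : pairOfShoesLoop shoes ((1 :: b :: t) :: rest) = pairOfShoesLoop shoes rest := by
              simp [pairOfShoesLoop, hcnt]
            rw [hstep, hrest]; simp [pvOk, hcnt]
          · have hstep : pairOfShoesLoop shoes ((1 :: b :: t) :: rest) = false := by
              simp [pairOfShoesLoop, hcnt]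
            rw [hstep]; simp [pvOk, hcnt]
        · have hstep : pairOfShoesLoop shoes ((a :: b :: t) :: rest) = pairOfShoesLoop shoes rest := by
            simp [pairOfShoesLoop, ha0, ha1]
          rw [hstep, hrest]; simp [pvOk, ha0, ha1]

-- pvLexLt is the lexicographic strict order of Mathlib's LinearOrder (List Int)
lemma pvLexLt_iff (a b : List Int) : pvLexLt a b = true ↔ a < b := by
  induction a generalizing b with
  | nil =>
    cases b with
    | nil => simp [pvLexLt]
    | cons x t => simp [pvLexLt, List.nil_lt_cons]
  | cons x s ih =>
    cases b with
    | nil => simp [pvLexLt, List.not_lt_nil]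
    | cons y t =>
      rcases lt_trichotomy x y with h | h | h
      · simp [pvLexLt, h, List.cons_lt_cons_iff]
      · subst h
        simp [pvLexLt, ih]
      · have hxy : ¬ x < y := by omega
        simp only [pvLexLt, if_neg hxy, if_pos h]
        simp [List.cons_lt_cons_iff]
        omega

-- B's search condition as a decide: x < rec (strict=false) resp. x ≤ rec (strict=true)
def pvQ (rec : List Int) (strict : Bool) (x : List Int) : Bool :=
  pvLexLt x rec || (strict && (x == rec))

lemma pvQ_false (rec x : List Int) : pvQ rec false x = decide (x < rec) := by
  apply Bool.eq_iff_iff.mpr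
  simp [pvQ, pvLexLt_iff]

lemma pvQ_true (rec x : List Int) : pvQ rec true x = decide (x ≤ rec) := by
  apply Bool.eq_iff_iff.mpr
  simp [pvQ, pvLexLt_iff, le_iff_lt_or_eq]

-- the binary search returns the boundary index of the true-prefix of pvQ
lemma pvBsLoop_char (srt : List (List Int)) (rec : List Int) (strict : Bool)
    (hpre : ∀ i j : Nat, (hij : i ≤ j) → (hj : j < srt.length) →
      pvQ rec strict srt[j] = true → pvQ rec strict (srt[i]'(by omega)) = true) :
    ∀ n lo hi, hi - lo = n → lo ≤ hi → hi ≤ srt.length →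
    (∀ i : Nat, i < lo → (h : i < srt.length) → pvQ rec strict srt[i] = true) →
    (∀ i : Nat, hi ≤ i → (h : i < srt.length) → pvQ rec strict srt[i] = false) →
    (pvBsLoop srt rec strict lo hi ≤ srt.length ∧
      ∀ i : Nat, (h : i < srt.length) →
        (pvQ rec strict srt[i] = true ↔ i < pvBsLoop srt rec strict lo hi)) := by
  intro n
  induction n using Nat.strong_induction_on with
  | _ n IH =>
    intro lo hi hn hlohi hhilen hlow hhigh
    by_cases h : lo < hi
    · have hmidlt : (lo + hi) / 2 < hi := by omega
      have hmidge : lo ≤ (lo + hi) / 2 := by omega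
      have hmidlen : (lo + hi) / 2 < srt.length := by omega
      have hget : srt.getD ((lo + hi) / 2) [] = srt[(lo + hi) / 2] := by
        exact List.getD_eq_getElem srt [] hmidlen
      rw [pvBsLoop]
      simp only [if_pos h]
      by_cases hq : pvQ rec strict srt[(lo + hi) / 2] = true
      · have hcond : (pvLexLt (srt.getD ((lo + hi) / 2) []) rec ||
            (strict && (srt.getD ((lo + hi) / 2) [] == rec))) = true := by
          rw [hget]; exact hq
        rw [if_pos hcond]
        refine IH (hi - ((lo + hi) / 2 + 1)) (by omega) ((lo + hi) / 2 + 1) hi rfl (by omega)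
          hhilen ?_ hhigh
        intro i hi' h'
        exact hpre i ((lo + hi) / 2) (by omega) hmidlen hq
      · have hcond : (pvLexLt (srt.getD ((lo + hi) / 2) []) rec ||
            (strict && (srt.getD ((lo + hi) / 2) [] == rec))) = false := by
          rw [hget]; exact Bool.eq_false_iff.mpr hq
        rw [if_neg (by rw [hcond]; exact Bool.false_ne_true)]
        refine IH ((lo + hi) / 2 - lo) (by omega) lo ((lo + hi) / 2) rfl (by omega)
          (by omega) hlow ?_
        intro i hi' h'
        by_contra hx
        simp only [Bool.not_eq_false] at hx
        exact hq (hpre ((lo + hi) / 2) i hi' h' hx)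
    · have hlohieq : lo = hi := by omega
      rw [pvBsLoop]
      simp only [if_neg h]
      refine ⟨by omega, ?_⟩
      intro i hilen
      constructor
      · intro hq
        by_contra hge
        have : pvQ rec strict srt[i] = false := hhigh i (by omega) hilen
        rw [hq] at this; exact Bool.true_eq_false.mp this
      · intro hlt
        exact hlow i (by omega) hilen

-- a predicate true exactly on an index prefix has that prefix's length as its countP
lemma pvCountP_of_char (l : List (List Int)) (q : List Int → Bool) :
    ∀ r : Nat, r ≤ l.length →
    (∀ i : Nat, (h : i < l.length) → (q l[i] = true ↔ i < r)) →
    l.countP q = r := by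
  induction l with
  | nil =>
    intro r hr _
    have : r = 0 := Nat.le_zero.mp (by simpa using hr)
    subst this; rfl
  | cons x t ih =>
    intro r hr hchar
    cases r with
    | zero =>
      have hx : q x = false := by
        have := hchar 0 (by simp)
        simpa using this
      rw [List.countP_cons, hx]
      simp only [List.length_cons] at hr
      have := ih 0 (by omega) (fun i h => by
        have := hchar (i + 1) (by simpa using Nat.succ_lt_succ h)
        simpa using this)
      simpa using this
    | succ r' =>
      have hx : q x = true := by
        have := hchar 0 (by simp)
        simpa using this
      simp only [List.length_cons] at hr
      have ht := ih r' (by omega) (fun i h => by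
        have := hchar (i + 1) (by simpa using Nat.succ_lt_succ h)
        simpa [Nat.succ_lt_succ_iff] using this)
      rw [List.countP_cons]
      simp [hx, ht]

-- on any list, countP (≤ rec) = countP (< rec) + count rec
lemma pvCountP_split (l : List (List Int)) (rec : List Int) :
    l.countP (fun x => decide (x ≤ rec)) =
      l.countP (fun x => decide (x < rec)) + l.count rec := by
  induction l with
  | nil => rfl
  | cons x t ih =>
    rw [List.countP_cons, List.countP_cons, List.count_cons]
    rcases lt_trichotomy x rec with h | h | h
    · have hne : ¬ x = rec := ne_of_lt h
      simp [le_of_lt h, h, hne]; omega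
    · subst h
      simp; omega
    · have hnle : ¬ x ≤ rec := not_le_of_gt h
      have hnlt : ¬ x < rec := by exact fun hc => absurd (lt_trans hc h) (lt_irrefl x)
      have hne : ¬ x = rec := by exact fun hc => absurd (hc ▸ h) (lt_irrefl x)
      simp [hnle, hnlt, hne]; omega

-- B's count_of on the sorted list is the exact multiplicity in shoes
lemma pvCountOf_eq (shoes : List (List Int)) (rec : List Int) :
    pvCountOf (pvSorted shoes) rec =
      (shoes.count rec : Int) := by
  have hpre : ∀ (strict : Bool), ∀ i j : Nat, (hij : i ≤ j) →
      (hj : j < (pvSorted shoes).length) →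
      pvQ rec strict (pvSorted shoes)[j] = true →
      pvQ rec strict ((pvSorted shoes)[i]'(by omega)) = true := by
    intro strict i j hij hj hq
    have hmono := PySem.List.sorted_id_getElem_mono (κ := List Int) shoes hij hj
    cases strict
    · rw [pvQ_false] at *
      simp only [decide_eq_true_eq] at *
      exact lt_of_le_of_lt hmono hq
    · rw [pvQ_true] at *
      simp only [decide_eq_true_eq] at *
      exact le_trans hmono hq
  have hchar : ∀ (strict : Bool),
      pvFirstAtLeast (pvSorted shoes) rec strict =
        (pvSorted shoes).countP (pvQ rec strict) := by
    intro strict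
    obtain ⟨hle, hch⟩ := pvBsLoop_char (pvSorted shoes) rec strict
      (hpre strict) (pvSorted shoes).length 0
      (pvSorted shoes).length
      rfl (by omega) (le_refl _) (by omega) (by omega)
    exact (pvCountP_of_char _ (pvQ rec strict) _ hle hch).symm
  unfold pvCountOf
  rw [hchar true, hchar false]
  have h1 : (pvSorted shoes).countP (pvQ rec true) =
      (pvSorted shoes).countP (fun x => decide (x ≤ rec)) :=
    List.countP_congr (fun x _ => by rw [pvQ_true])
  have h0 : (pvSorted shoes).countP (pvQ rec false) =
      (pvSorted shoes).countP (fun x => decide (x < rec)) :=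
    List.countP_congr (fun x _ => by rw [pvQ_false])
  rw [h1, h0, pvCountP_split _ rec]
  have hperm : (pvSorted shoes).Perm shoes := by
    unfold pvSorted
    exact @PySem.List.sorted_perm (List Int) (List Int) LinearOrder.toPartialOrder.toLT
      LinearOrder.toDecidableLT shoes (fun x => x) false
  rw [hperm.count_eq]
  push_cast
  ring

-- B's loop checks pvOk at every record of its list, early return = List.all
lemma pvLoopB_eq (shoes l : List (List Int))
    (hl : ∀ e ∈ l, e ≠ [] ∧ (e.length = 1 → e.headI ≠ 0 ∧ e.headI ≠ 1)) :
    pairOfShoesAltLoop (pvSorted shoes) l = l.all (pvOk shoes) := by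
  induction l with
  | nil => rfl
  | cons e rest ih =>
    have he := hl e (List.mem_cons_self ..)
    have hrest := ih (fun x hx => hl x (List.mem_cons_of_mem _ hx))
    have hc := pvCountOf_eq shoes
    match e with
    | [] => exact absurd rfl he.1
    | [a] =>
      obtain ⟨ha0, ha1⟩ := he.2 rfl
      simp only [List.headI] at ha0 ha1
      have hstep : pairOfShoesAltLoop (pvSorted shoes) ([a] :: rest) =
          pairOfShoesAltLoop (pvSorted shoes) rest := by
        simp [pairOfShoesAltLoop, ha0, ha1]
      rw [hstep, hrest]
      simp [pvOk]
    | a :: b :: t =>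
      by_cases ha0 : a = 0
      · subst ha0
        by_cases hcnt : List.count (0 :: b :: t : List Int) shoes = List.count [1, b] shoes
        · have hstep : pairOfShoesAltLoop (pvSorted shoes)
              ((0 :: b :: t) :: rest) =
              pairOfShoesAltLoop (pvSorted shoes) rest := by
            simp [pairOfShoesAltLoop, hc, hcnt]
          rw [hstep, hrest]; simp [pvOk, hcnt]
        · have hcnt' : ((0 :: b :: t : List Int) :: rest ≠ [] → True) := fun _ => trivial
          have hstep : pairOfShoesAltLoop (pvSorted shoes)
              ((0 :: b :: t) :: rest) = false := by
            have : ((List.count (0 :: b :: t : List Int) shoes : Int) ≠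
                (List.count [1, b] shoes : Int)) := by exact_mod_cast hcnt
            simp [pairOfShoesAltLoop, hc, this]
          rw [hstep]; simp [pvOk, hcnt]
      · by_cases ha1 : a = 1
        · subst ha1
          by_cases hcnt : List.count (1 :: b :: t : List Int) shoes = List.count [0, b] shoes
          · have hstep : pairOfShoesAltLoop (pvSorted shoes)
                ((1 :: b :: t) :: rest) =
                pairOfShoesAltLoop (pvSorted shoes) rest := by
              simp [pairOfShoesAltLoop, hc, hcnt]
            rw [hstep, hrest]; simp [pvOk, hcnt]
          · have hstep : pairOfShoesAltLoop (pvSorted shoes)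
                ((1 :: b :: t) :: rest) = false := by
              have : ((List.count (1 :: b :: t : List Int) shoes : Int) ≠
                  (List.count [0, b] shoes : Int)) := by exact_mod_cast hcnt
              simp [pairOfShoesAltLoop, hc, this]
            rw [hstep]; simp [pvOk, hcnt]
        · have hstep : pairOfShoesAltLoop (pvSorted shoes)
              ((a :: b :: t) :: rest) =
              pairOfShoesAltLoop (pvSorted shoes) rest := by
            simp [pairOfShoesAltLoop, ha0, ha1]
          rw [hstep, hrest]; simp [pvOk, ha0, ha1]

-- all over two lists with the same members agree
lemma pvAll_congr_mem (l1 l2 : List (List Int)) (h : ∀ x, x ∈ l1 ↔ x ∈ l2)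
    (p : List Int → Bool) : l1.all p = l2.all p := by
  cases h2 : l2.all p with
  | true =>
    rw [List.all_eq_true] at h2 ⊢
    exact fun x hx => h2 x ((h x).mp hx)
  | false =>
    rw [List.all_eq_false] at h2 ⊢
    obtain ⟨x, hx, hpx⟩ := h2
    exact ⟨x, (h x).mpr hx, hpx⟩

-- ===== VERDICT (by name: the statement is the Claim_ definition above) =====
theorem pairOfShoes_spec : Claim_equal_pairOfShoes := by
  intro shoes _ hpre
  unfold Spec_pairOfShoes pairOfShoes pairOfShoes_alt
  have hmem : ∀ x, x ∈ PySem.List.dedup (pvSorted shoes) ↔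
      x ∈ shoes := by
    intro x
    rw [PySem.List.mem_dedup]
    unfold pvSorted
    exact (@PySem.List.sorted_perm (List Int) (List Int) LinearOrder.toPartialOrder.toLT
      LinearOrder.toDecidableLT shoes (fun x => x) false).mem_iff
  rw [pvLoopA_eq shoes shoes hpre]
  rw [pvLoopB_eq shoes _ (fun e he => hpre e ((hmem e).mp he))]
  exact pvAll_congr_mem shoes _ (fun x => (hmem x).symm) (pvOk shoes)
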